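-- pv_equiv track=rewrite | github.com/crucial-rushil/geo-agent | api/app.py | find_route_files
-- ===== SOURCE A (Python) =====
-- def find_route_files(tree_paths, framework, prefix=""):
--     """Identify which files would contain route/page information."""
--     route_files = []
--
--     if framework in ("Next.js",):
--         for p in tree_paths:
--             if (p.startswith(f"{prefix}app/") or p.startswith(f"{prefix}src/app/")) and (
--                 p.endswith("page.tsx")
--                 or p.endswith("page.jsx")
--                 or p.endswith("page.js")
--                 or p.endswith("page.ts")
--             ):
--                 route_files.append(p)
--             elif (p.startswith(f"{prefix}pages/") or p.startswith(f"{prefix}src/pages/")) and (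
--                 p.endswith(".tsx") or p.endswith(".jsx") or p.endswith(".js")
--             ):
--                 if not p.startswith(f"{prefix}pages/api/") and not p.startswith(
--                     f"{prefix}src/pages/api/"
--                 ):
--                     route_files.append(p)
--     elif framework == "Nuxt":
--         for p in tree_paths:
--             if p.startswith(f"{prefix}pages/") and (
--                 p.endswith(".vue") or p.endswith(".tsx")
--             ):
--                 route_files.append(p)
--     elif framework == "Gatsby":
--         for p in tree_paths:
--             if p.startswith(f"{prefix}src/pages/") and (
--                 p.endswith(".tsx") or p.endswith(".jsx") or p.endswith(".js")
--             ):
--                 route_files.append(p)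
--     elif framework == "SvelteKit":
--         for p in tree_paths:
--             if p.startswith(f"{prefix}src/routes/") and "+page.svelte" in p:
--                 route_files.append(p)
--     elif framework == "Astro":
--         for p in tree_paths:
--             if p.startswith(f"{prefix}src/pages/") and (
--                 p.endswith(".astro") or p.endswith(".md") or p.endswith(".mdx")
--             ):
--                 route_files.append(p)
--     elif framework in ("Vite + React", "Create React App"):
--         for p in tree_paths:
--             if p.startswith(prefix) and any(
--                 name in p.lower()
--                 for name in ["app.jsx", "app.tsx", "app.js", "router", "routes"]
--             ):
--                 route_files.append(p)
--     elif framework == "Static HTML":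
--         for p in tree_paths:
--             if p.startswith(prefix) and p.endswith(".html") and not p.startswith("."):
--                 route_files.append(p)
--     elif framework in ("Hugo", "Jekyll"):
--         for p in tree_paths:
--             if p.startswith(f"{prefix}content/") or p.startswith(f"{prefix}_posts/"):
--                 route_files.append(p)
--     else:
--         for p in tree_paths:
--             if p.startswith(prefix) and (
--                 p.endswith(".html") or "route" in p.lower() or "page" in p.lower()
--             ):
--                 route_files.append(p)
--
--     return route_files[:30]
-- ===== SOURCE B (Python) =====
-- def find_route_files(tree_paths, framework, prefix=""):
--     """Identify which files would contain route/page information."""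
--     # Data-driven: a framework's selection logic is a list of clauses
--     # (or_prefixes, or_tests, excluded_prefixes); a path is a route file if some
--     # clause has a matching prefix, a matching test (empty test list = always),
--     # and no excluded prefix.  Tests: ("end", s) = endswith, ("has", s) = substring,
--     # ("low", s) = substring of p.lower().  A single generic scan interprets the
--     # table and stops as soon as 30 paths are collected.
--     E, H, L = "end", "has", "low"
--     rule_table = {
--         "Next.js": [
--             ([prefix + "app/", prefix + "src/app/"],
--              [(E, "page.tsx"), (E, "page.jsx"), (E, "page.js"), (E, "page.ts")], []),
--             ([prefix + "pages/", prefix + "src/pages/"],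
--              [(E, ".tsx"), (E, ".jsx"), (E, ".js")],
--              [prefix + "pages/api/", prefix + "src/pages/api/"]),
--         ],
--         "Nuxt": [([prefix + "pages/"], [(E, ".vue"), (E, ".tsx")], [])],
--         "Gatsby": [([prefix + "src/pages/"], [(E, ".tsx"), (E, ".jsx"), (E, ".js")], [])],
--         "SvelteKit": [([prefix + "src/routes/"], [(H, "+page.svelte")], [])],
--         "Astro": [([prefix + "src/pages/"], [(E, ".astro"), (E, ".md"), (E, ".mdx")], [])],
--         "Vite + React": [([prefix],
--                           [(L, "app.jsx"), (L, "app.tsx"), (L, "app.js"), (L, "router"), (L, "routes")], [])],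
--         "Create React App": [([prefix],
--                               [(L, "app.jsx"), (L, "app.tsx"), (L, "app.js"), (L, "router"), (L, "routes")], [])],
--         "Static HTML": [([prefix], [(E, ".html")], ["."])],
--         "Hugo": [([prefix + "content/", prefix + "_posts/"], [], [])],
--         "Jekyll": [([prefix + "content/", prefix + "_posts/"], [], [])],
--     }
--     default = [([prefix], [(E, ".html"), (L, "route"), (L, "page")], [])]
--     clauses = rule_table.get(framework, default)
--
--     def test(p, kind, s):
--         if kind == E:
--             return p.endswith(s)
--         if kind == H:
--             return s in p
--         return s in p.lower()
--
--     def matches(p):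
--         return any(
--             any(p.startswith(pre) for pre in pres)
--             and (not tests or any(test(p, k, s) for k, s in tests))
--             and not any(p.startswith(x) for x in excl)
--             for pres, tests, excl in clauses
--         )
--
--     out = []
--     for p in tree_paths:
--         if len(out) == 30:
--             break
--         if matches(p):
--             out.append(p)
--     return out
-- ===== Notes on version B (the rewrite author's own statement) =====
-- stated objective: alternative
-- what changed: Replaced A's nine hard-coded framework loops plus a final [:30] slice by a declarative rule table (clauses of prefixes/tests/exclusions per framework) interpreted by one generic matcher, and a single scan that stops as soon as 30 matches are collected instead of filtering everything and slicing.
import Mathlib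
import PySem

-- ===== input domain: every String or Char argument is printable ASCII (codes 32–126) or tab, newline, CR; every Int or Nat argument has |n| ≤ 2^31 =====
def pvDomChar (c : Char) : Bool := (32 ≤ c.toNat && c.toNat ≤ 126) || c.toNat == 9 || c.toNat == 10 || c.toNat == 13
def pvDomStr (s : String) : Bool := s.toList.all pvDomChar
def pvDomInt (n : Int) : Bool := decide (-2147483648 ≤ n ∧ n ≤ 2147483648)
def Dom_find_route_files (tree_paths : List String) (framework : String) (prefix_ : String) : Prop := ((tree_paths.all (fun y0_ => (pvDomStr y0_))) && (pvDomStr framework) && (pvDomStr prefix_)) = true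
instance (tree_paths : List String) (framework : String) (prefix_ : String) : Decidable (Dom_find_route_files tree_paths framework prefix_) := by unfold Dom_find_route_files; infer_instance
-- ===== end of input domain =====

-- B replaces A's nine hard-coded loops + final [:30] slice by a declarative rule table
-- interpreted by one generic clause matcher, scanned once with early stop at 30 matches.

-- ===== PORT A =====
def find_route_files (tree_paths : List String) (framework : String) (prefix_ : String) : List String :=
  let route_files : List String :=
    if framework == "Next.js" then
      tree_paths.foldl (fun acc p =>
        if (PySem.Str.startswith p (prefix_ ++ "app/") || PySem.Str.startswith p (prefix_ ++ "src/app/")) &&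
           (PySem.Str.endswith p "page.tsx" || PySem.Str.endswith p "page.jsx" ||
            PySem.Str.endswith p "page.js" || PySem.Str.endswith p "page.ts") then
          acc ++ [p]
        else if (PySem.Str.startswith p (prefix_ ++ "pages/") || PySem.Str.startswith p (prefix_ ++ "src/pages/")) &&
                (PySem.Str.endswith p ".tsx" || PySem.Str.endswith p ".jsx" || PySem.Str.endswith p ".js") then
          if !PySem.Str.startswith p (prefix_ ++ "pages/api/") && !PySem.Str.startswith p (prefix_ ++ "src/pages/api/") then
            acc ++ [p]
          else acc
        else acc) []
    else if framework == "Nuxt" then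
      tree_paths.foldl (fun acc p =>
        if PySem.Str.startswith p (prefix_ ++ "pages/") &&
           (PySem.Str.endswith p ".vue" || PySem.Str.endswith p ".tsx") then acc ++ [p] else acc) []
    else if framework == "Gatsby" then
      tree_paths.foldl (fun acc p =>
        if PySem.Str.startswith p (prefix_ ++ "src/pages/") &&
           (PySem.Str.endswith p ".tsx" || PySem.Str.endswith p ".jsx" || PySem.Str.endswith p ".js") then
          acc ++ [p] else acc) []
    else if framework == "SvelteKit" then
      tree_paths.foldl (fun acc p =>
        if PySem.Str.startswith p (prefix_ ++ "src/routes/") && PySem.Str.isIn "+page.svelte" p then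
          acc ++ [p] else acc) []
    else if framework == "Astro" then
      tree_paths.foldl (fun acc p =>
        if PySem.Str.startswith p (prefix_ ++ "src/pages/") &&
           (PySem.Str.endswith p ".astro" || PySem.Str.endswith p ".md" || PySem.Str.endswith p ".mdx") then
          acc ++ [p] else acc) []
    else if framework == "Vite + React" || framework == "Create React App" then
      tree_paths.foldl (fun acc p =>
        if PySem.Str.startswith p prefix_ &&
           (["app.jsx", "app.tsx", "app.js", "router", "routes"].any
             (fun name => PySem.Str.isIn name (PySem.Str.lower p))) then
          acc ++ [p] else acc) []
    else if framework == "Static HTML" then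
      tree_paths.foldl (fun acc p =>
        if PySem.Str.startswith p prefix_ && PySem.Str.endswith p ".html" && !PySem.Str.startswith p "." then
          acc ++ [p] else acc) []
    else if framework == "Hugo" || framework == "Jekyll" then
      tree_paths.foldl (fun acc p =>
        if PySem.Str.startswith p (prefix_ ++ "content/") || PySem.Str.startswith p (prefix_ ++ "_posts/") then
          acc ++ [p] else acc) []
    else
      tree_paths.foldl (fun acc p =>
        if PySem.Str.startswith p prefix_ &&
           (PySem.Str.endswith p ".html" || PySem.Str.isIn "route" (PySem.Str.lower p) ||
            PySem.Str.isIn "page" (PySem.Str.lower p)) then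
          acc ++ [p] else acc) []
  PySem.List.slice route_files none (some 30)

-- ===== PORT B =====
-- a test on a path: endswith / substring / substring of lower-cased path
inductive PvTest
  | ends : String → PvTest
  | has : String → PvTest
  | low : String → PvTest
deriving DecidableEq, Repr

def pvTestEval (p : String) : PvTest → Bool
  | .ends s => PySem.Str.endswith p s
  | .has s => PySem.Str.isIn s p
  | .low s => PySem.Str.isIn s (PySem.Str.lower p)

-- a clause: (or-prefixes, or-tests (empty = always true), excluded prefixes)
def pvRuleTable (prefix_ : String) : PySem.Dict String (List (List String × List PvTest × List String)) :=
  PySem.Dict.ofList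
    [("Next.js",
      [([prefix_ ++ "app/", prefix_ ++ "src/app/"],
        [.ends "page.tsx", .ends "page.jsx", .ends "page.js", .ends "page.ts"], []),
       ([prefix_ ++ "pages/", prefix_ ++ "src/pages/"],
        [.ends ".tsx", .ends ".jsx", .ends ".js"],
        [prefix_ ++ "pages/api/", prefix_ ++ "src/pages/api/"])]),
     ("Nuxt", [([prefix_ ++ "pages/"], [.ends ".vue", .ends ".tsx"], [])]),
     ("Gatsby", [([prefix_ ++ "src/pages/"], [.ends ".tsx", .ends ".jsx", .ends ".js"], [])]),
     ("SvelteKit", [([prefix_ ++ "src/routes/"], [.has "+page.svelte"], [])]),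
     ("Astro", [([prefix_ ++ "src/pages/"], [.ends ".astro", .ends ".md", .ends ".mdx"], [])]),
     ("Vite + React", [([prefix_],
        [.low "app.jsx", .low "app.tsx", .low "app.js", .low "router", .low "routes"], [])]),
     ("Create React App", [([prefix_],
        [.low "app.jsx", .low "app.tsx", .low "app.js", .low "router", .low "routes"], [])]),
     ("Static HTML", [([prefix_], [.ends ".html"], ["."])]),
     ("Hugo", [([prefix_ ++ "content/", prefix_ ++ "_posts/"], [], [])]),
     ("Jekyll", [([prefix_ ++ "content/", prefix_ ++ "_posts/"], [], [])])]

def pvDefaultRules (prefix_ : String) : List (List String × List PvTest × List String) :=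
  [([prefix_], [.ends ".html", .low "route", .low "page"], [])]

def pvMatches (clauses : List (List String × List PvTest × List String)) (p : String) : Bool :=
  clauses.any (fun c =>
    c.1.any (fun pre => PySem.Str.startswith p pre) &&
    (c.2.1.isEmpty || c.2.1.any (pvTestEval p)) &&
    !(c.2.2.any (fun x => PySem.Str.startswith p x)))

def find_route_files_alt (tree_paths : List String) (framework : String) (prefix_ : String) : List String :=
  let clauses := (pvRuleTable prefix_).getD framework (pvDefaultRules prefix_)
  tree_paths.foldl (fun out p =>
    if out.length == 30 then out
    else if pvMatches clauses p then out ++ [p] else out) []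

-- ===== PRECONDITION & SPEC =====
def Spec_find_route_files (tree_paths : List String) (framework : String) (prefix_ : String) (out : List String) : Prop := out = find_route_files_alt tree_paths framework prefix_
instance (tree_paths : List String) (framework : String) (prefix_ : String) (out : List String) : Decidable (Spec_find_route_files tree_paths framework prefix_ out) := by unfold Spec_find_route_files; infer_instance

-- ===== CLAIM =====
def Claim_equal_find_route_files : Prop := ∀ (tree_paths : List String) (framework : String) (prefix_ : String), Dom_find_route_files tree_paths framework prefix_ → Spec_find_route_files tree_paths framework prefix_ (find_route_files tree_paths framework prefix_)

-- ===== LEMMAS AND PROOFS =====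

-- B's capped accumulation is 'filter then take 30'
theorem capFold_eq_take_filter (c : String → Bool) (l : List String) (acc : List String)
    (h : acc.length ≤ 30) :
    l.foldl (fun out p => if out.length == 30 then out else if c p then out ++ [p] else out) acc
      = acc ++ (l.filter c).take (30 - acc.length) := by
  induction l generalizing acc with
  | nil => simp
  | cons p ps ih =>
    rw [List.foldl_cons]
    by_cases h30 : acc.length = 30
    · rw [if_pos (by simp [h30]), ih acc h]
      simp [h30]
    · rw [if_neg (by simp [h30])]
      by_cases hc : c p
      · rw [if_pos hc, ih (acc ++ [p]) (by simp; omega)]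
        simp only [List.filter_cons, hc, if_true]
        rw [List.append_assoc]
        congr 1
        simp only [List.length_append, List.length_cons, List.length_nil, List.nil_append,
          List.cons_append, List.singleton_append]
        have h1 : 30 - acc.length = (30 - (acc.length + 1)) + 1 := by omega
        rw [h1, List.take_succ_cons]
      · rw [if_neg hc, ih acc h]
        simp [List.filter_cons, hc]

theorem alt_eq (tp : List String) (fw pre : String) :
    find_route_files_alt tp fw pre
      = ((tp.filter (pvMatches ((pvRuleTable pre).getD fw (pvDefaultRules pre)))).take 30) := by
  simp only [find_route_files_alt]
  simpa using
    capFold_eq_take_filter (pvMatches ((pvRuleTable pre).getD fw (pvDefaultRules pre))) tp []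
      (by simp)

theorem slice_30 (l : List String) : PySem.List.slice l none (some 30) = l.take 30 := by
  rw [show (30 : Int) = ((30 : Nat) : Int) from rfl, PySem.List.slice_to_natCast]

-- the rule table, resolved key by key
theorem getD_pvRuleTable (pre fw : String) (d : List (List String × List PvTest × List String)) :
    (pvRuleTable pre).getD fw d =
    if fw = "Jekyll" then [([pre ++ "content/", pre ++ "_posts/"], [], [])]
    else if fw = "Hugo" then [([pre ++ "content/", pre ++ "_posts/"], [], [])]
    else if fw = "Static HTML" then [([pre], [.ends ".html"], ["."])]
    else if fw = "Create React App" then [([pre],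
        [.low "app.jsx", .low "app.tsx", .low "app.js", .low "router", .low "routes"], [])]
    else if fw = "Vite + React" then [([pre],
        [.low "app.jsx", .low "app.tsx", .low "app.js", .low "router", .low "routes"], [])]
    else if fw = "Astro" then [([pre ++ "src/pages/"], [.ends ".astro", .ends ".md", .ends ".mdx"], [])]
    else if fw = "SvelteKit" then [([pre ++ "src/routes/"], [.has "+page.svelte"], [])]
    else if fw = "Gatsby" then [([pre ++ "src/pages/"], [.ends ".tsx", .ends ".jsx", .ends ".js"], [])]
    else if fw = "Nuxt" then [([pre ++ "pages/"], [.ends ".vue", .ends ".tsx"], [])]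
    else if fw = "Next.js" then
      [([pre ++ "app/", pre ++ "src/app/"],
        [.ends "page.tsx", .ends "page.jsx", .ends "page.js", .ends "page.ts"], []),
       ([pre ++ "pages/", pre ++ "src/pages/"],
        [.ends ".tsx", .ends ".jsx", .ends ".js"],
        [pre ++ "pages/api/", pre ++ "src/pages/api/"])]
    else d := by
  simp [pvRuleTable, PySem.Dict.ofList, PySem.Dict.update, PySem.Dict.getD_insert, PySem.Dict.getD_empty]

-- A's 'append if' loop is a filter
theorem loopA_eq_filter (l : List String) (c : String → Bool) :
    l.foldl (fun acc p => if c p then acc ++ [p] else acc) [] = l.filter c := by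
  simpa using PySem.List.foldl_append_if_eq_filter (p := c) (l := l) (acc := [])

-- per-path Boolean table for the Next.js case, over opaque atomic tests
theorem nextjs_if_table (acc : List String) (p : String)
    (A1 A2 E1 E2 E3 E4 B1 B2 F1 F2 F3 X1 X2 : Bool) :
    (if (A1 || A2) && (E1 || E2 || E3 || E4) then acc ++ [p]
     else if (B1 || B2) && (F1 || F2 || F3) then
       if !X1 && !X2 then acc ++ [p] else acc
     else acc)
    = (if (A1 || (A2 || false)) && (false || (E1 || (E2 || (E3 || (E4 || false))))) && !false ||
          ((B1 || (B2 || false)) && (false || (F1 || (F2 || (F3 || false)))) && !(X1 || (X2 || false)) || false)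
       then acc ++ [p] else acc) := by
  cases A1 <;> cases A2 <;> cases E1 <;> cases E2 <;> cases E3 <;> cases E4 <;>
    cases B1 <;> cases B2 <;> cases F1 <;> cases F2 <;> cases F3 <;> cases X1 <;> cases X2 <;> rfl

-- A's two-branch Next.js loop is a filter by the two Next.js clauses
theorem nextjs_fold_eq_filter (tp : List String) (pre : String) :
    tp.foldl (fun acc p =>
      if (PySem.Str.startswith p (pre ++ "app/") || PySem.Str.startswith p (pre ++ "src/app/")) &&
         (PySem.Str.endswith p "page.tsx" || PySem.Str.endswith p "page.jsx" ||
          PySem.Str.endswith p "page.js" || PySem.Str.endswith p "page.ts") then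
        acc ++ [p]
      else if (PySem.Str.startswith p (pre ++ "pages/") || PySem.Str.startswith p (pre ++ "src/pages/")) &&
              (PySem.Str.endswith p ".tsx" || PySem.Str.endswith p ".jsx" || PySem.Str.endswith p ".js") then
        if !PySem.Str.startswith p (pre ++ "pages/api/") && !PySem.Str.startswith p (pre ++ "src/pages/api/") then
          acc ++ [p]
        else acc
      else acc) [] =
    tp.filter (pvMatches
      [([pre ++ "app/", pre ++ "src/app/"],
        [.ends "page.tsx", .ends "page.jsx", .ends "page.js", .ends "page.ts"], []),
       ([pre ++ "pages/", pre ++ "src/pages/"],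
        [.ends ".tsx", .ends ".jsx", .ends ".js"],
        [pre ++ "pages/api/", pre ++ "src/pages/api/"])]) := by
  rw [← loopA_eq_filter]
  congr 1
  funext acc p
  simp only [pvMatches, List.any_cons, List.any_nil, pvTestEval, List.isEmpty_cons]
  exact nextjs_if_table acc p _ _ _ _ _ _ _ _ _ _ _ _ _

-- ===== VERDICT =====
theorem find_route_files_spec : Claim_equal_find_route_files := by
  intro tp fw pre _
  unfold Spec_find_route_files
  rw [alt_eq, getD_pvRuleTable]
  simp only [find_route_files, slice_30]
  by_cases h1 : fw = "Next.js"
  · subst h1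
    simp only [String.reduceEq, String.reduceBEq, reduceIte, beq_self_eq_true, Bool.or_self,
      Bool.false_or, Bool.or_false, nextjs_fold_eq_filter]
  by_cases h2 : fw = "Nuxt"
  · subst h2
    simp only [String.reduceEq, String.reduceBEq, reduceIte, beq_self_eq_true, Bool.or_self,
      Bool.false_or, Bool.or_false, loopA_eq_filter]
    congr 1
    apply List.filter_congr
    intro p _
    simp [pvMatches, pvTestEval]
  by_cases h3 : fw = "Gatsby"
  · subst h3
    simp only [String.reduceEq, String.reduceBEq, reduceIte, beq_self_eq_true, Bool.or_self,
      Bool.false_or, Bool.or_false, loopA_eq_filter]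
    congr 1
    apply List.filter_congr
    intro p _
    simp [pvMatches, pvTestEval, Bool.or_assoc]
  by_cases h4 : fw = "SvelteKit"
  · subst h4
    simp only [String.reduceEq, String.reduceBEq, reduceIte, beq_self_eq_true, Bool.or_self,
      Bool.false_or, Bool.or_false, loopA_eq_filter]
    congr 1
    apply List.filter_congr
    intro p _
    simp [pvMatches, pvTestEval]
  by_cases h5 : fw = "Astro"
  · subst h5
    simp only [String.reduceEq, String.reduceBEq, reduceIte, beq_self_eq_true, Bool.or_self,
      Bool.false_or, Bool.or_false, loopA_eq_filter]
    congr 1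
    apply List.filter_congr
    intro p _
    simp [pvMatches, pvTestEval, Bool.or_assoc]
  by_cases h6 : fw = "Vite + React"
  · subst h6
    simp only [String.reduceEq, String.reduceBEq, reduceIte, beq_self_eq_true, Bool.or_self,
      Bool.false_or, Bool.or_false, loopA_eq_filter]
    congr 1
    apply List.filter_congr
    intro p _
    simp [pvMatches, pvTestEval, Bool.or_assoc]
  by_cases h7 : fw = "Create React App"
  · subst h7
    simp only [String.reduceEq, String.reduceBEq, reduceIte, beq_self_eq_true, Bool.or_self,
      Bool.false_or, Bool.or_false, loopA_eq_filter]
    congr 1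
    apply List.filter_congr
    intro p _
    simp [pvMatches, pvTestEval, Bool.or_assoc]
  by_cases h8 : fw = "Static HTML"
  · subst h8
    simp only [String.reduceEq, String.reduceBEq, reduceIte, beq_self_eq_true, Bool.or_self,
      Bool.false_or, Bool.or_false, loopA_eq_filter]
    congr 1
    apply List.filter_congr
    intro p _
    simp [pvMatches, pvTestEval, Bool.and_assoc]
  by_cases h9 : fw = "Hugo"
  · subst h9
    simp only [String.reduceEq, String.reduceBEq, reduceIte, beq_self_eq_true, Bool.or_self,
      Bool.false_or, Bool.or_false, loopA_eq_filter]
    congr 1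
    apply List.filter_congr
    intro p _
    simp [pvMatches, pvTestEval]
  by_cases h10 : fw = "Jekyll"
  · subst h10
    simp only [String.reduceEq, String.reduceBEq, reduceIte, beq_self_eq_true, Bool.or_self,
      Bool.false_or, Bool.or_false, loopA_eq_filter]
    congr 1
    apply List.filter_congr
    intro p _
    simp [pvMatches, pvTestEval]
  simp only [h1, h2, h3, h4, h5, h6, h7, h8, h9, h10, beq_iff_eq, Bool.or_eq_true, or_self,
    if_false, loopA_eq_filter]
  congr 1
  apply List.filter_congr
  intro p _
  simp [pvMatches, pvTestEval, pvDefaultRules, Bool.or_assoc]
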